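-- pv_equiv track=rewrite | github.com/XiaSanw/ChargeMind | backend/data/pipeline/utils.py | infer_region_from_grid
-- ===== SOURCE A (Python) =====
-- GRID_PREFIX_MAP = {
--     "L2NS": "南山区",
--     "L2FT": "福田区",
--     "L2LH": "龙华区",
--     "L2LG": "龙岗区",
--     "L2BABC": "宝安区",
--     "L2BASJ": "宝安区",
--     "L2BASG": "宝安区",
--     "L2GM": "光明区",
--     "L2PS": "坪山区",
--     "L2LYT": "盐田区",
--     "L2LDP": "大鹏新区",
--     "L2LSS": "罗湖区",
-- }
--
-- def infer_region_from_grid(grid_code):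
--     """
--     Infer Shenzhen district from grid code prefix.
--     Example: L2NS01-XXX001 -> 南山区
--     """
--     if not isinstance(grid_code, str):
--         return None
--     grid_code = grid_code.strip()
--     for prefix, region in GRID_PREFIX_MAP.items():
--         if grid_code.startswith(prefix):
--             return region
--     return None
-- ===== SOURCE B (Python) =====
-- GRID_PREFIX_MAP = {
--     "L2NS": "南山区",
--     "L2FT": "福田区",
--     "L2LH": "龙华区",
--     "L2LG": "龙岗区",
--     "L2BABC": "宝安区",
--     "L2BASJ": "宝安区",
--     "L2BASG": "宝安区",
--     "L2GM": "光明区",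
--     "L2PS": "坪山区",
--     "L2LYT": "盐田区",
--     "L2LDP": "大鹏新区",
--     "L2LSS": "罗湖区",
-- }
--
-- _LENGTHS = sorted({len(k) for k in GRID_PREFIX_MAP})
--
-- def infer_region_from_grid(grid_code):
--     """Prefix-table lookup: try each distinct key length once instead of scanning every entry."""
--     if not isinstance(grid_code, str):
--         return None
--     grid_code = grid_code.strip()
--     for length in _LENGTHS:
--         region = GRID_PREFIX_MAP.get(grid_code[:length])
--         if region is not None:
--             return region
--     return None
-- ===== Notes on version B (the rewrite author's own statement) =====
-- stated objective: idiomatic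
-- what changed: Replace the linear startswith-scan over all 12 dict entries by a direct dict lookup of grid_code[:L] for each of the 3 distinct key lengths (computed once), using the dict as a prefix table.
import Mathlib
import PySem

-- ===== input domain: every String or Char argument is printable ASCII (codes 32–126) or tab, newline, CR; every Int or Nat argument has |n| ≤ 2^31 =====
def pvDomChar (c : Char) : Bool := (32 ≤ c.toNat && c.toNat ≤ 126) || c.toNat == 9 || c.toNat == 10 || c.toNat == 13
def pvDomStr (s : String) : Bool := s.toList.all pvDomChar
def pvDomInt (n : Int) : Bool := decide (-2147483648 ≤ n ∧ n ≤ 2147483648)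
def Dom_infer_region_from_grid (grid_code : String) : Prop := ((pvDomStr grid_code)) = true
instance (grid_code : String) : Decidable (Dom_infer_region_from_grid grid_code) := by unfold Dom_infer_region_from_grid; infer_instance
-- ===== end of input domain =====

-- B replaces A's startswith-scan over every dict entry by direct dict lookups of
-- grid_code[:L] for the distinct key lengths (computed once); same return value.

-- ===== PORT A =====
def GRID_PREFIX_MAP : PySem.Dict String String := PySem.Dict.mk [
  ("L2NS", "南山区"), ("L2FT", "福田区"), ("L2LH", "龙华区"), ("L2LG", "龙岗区"),
  ("L2BABC", "宝安区"), ("L2BASJ", "宝安区"), ("L2BASG", "宝安区"),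
  ("L2GM", "光明区"), ("L2PS", "坪山区"), ("L2LYT", "盐田区"),
  ("L2LDP", "大鹏新区"), ("L2LSS", "罗湖区")]

-- the 'for prefix, region in GRID_PREFIX_MAP.items()' loop of A
def inferScanA (g : String) : List (String × String) → Option String
  | [] => none
  | (p, r) :: rest => if PySem.Str.startswith g p then some r else inferScanA g rest

def infer_region_from_grid (grid_code : String) : Option String :=
  let g := PySem.Str.strip grid_code
  inferScanA g GRID_PREFIX_MAP.items

-- ===== PORT B =====
-- _LENGTHS = sorted({len(k) for k in GRID_PREFIX_MAP})
def pvLengths : List Int :=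
  PySem.List.sorted (PySem.Set.ofList (GRID_PREFIX_MAP.keys.map (fun k => (PySem.Str.len k : Int)))) (fun x => x) false

-- the 'for length in _LENGTHS: region = GRID_PREFIX_MAP.get(grid_code[:length]) …' loop of B
def inferLookupB (g : String) : List Int → Option String
  | [] => none
  | L :: rest =>
      match GRID_PREFIX_MAP.get? (PySem.Str.slice g none (some L)) with
      | some region => some region
      | none => inferLookupB g rest

def infer_region_from_grid_alt (grid_code : String) : Option String :=
  let g := PySem.Str.strip grid_code
  inferLookupB g pvLengths

-- ===== PRECONDITION & SPEC =====
def Spec_infer_region_from_grid (grid_code : String) (out : Option String) : Prop := out = infer_region_from_grid_alt grid_code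
instance (grid_code : String) (out : Option String) : Decidable (Spec_infer_region_from_grid grid_code out) := by unfold Spec_infer_region_from_grid; infer_instance

-- ===== CLAIM (what is proved, stated in full; the proofs are below) =====
def Claim_equal_infer_region_from_grid : Prop := ∀ (grid_code : String), Dom_infer_region_from_grid grid_code → Spec_infer_region_from_grid grid_code (infer_region_from_grid grid_code)

-- ===== LEMMAS AND PROOFS =====

theorem lengths_eq : pvLengths = [4, 5, 6] := by decide

theorem slice_toList (g : String) (n : Nat) :
    (PySem.Str.slice g none (some (n : Int))).toList = g.toList.take n := by
  simp [PySem.List.slice_to_natCast]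

theorem get?_none_of_toList (x : String) (cs : List Char) (hx : x.toList = cs)
    (h : cs ∉ GRID_PREFIX_MAP.keys.map String.toList) : GRID_PREFIX_MAP.get? x = none := by
  rw [PySem.Dict.get?_eq_none_iff_not_mem_keys]
  intro hm
  exact h (hx ▸ List.mem_map_of_mem hm)

theorem get?_some_of_toList (x k v : String) (hx : x.toList = k.toList)
    (hkv : GRID_PREFIX_MAP.get? k = some v) : GRID_PREFIX_MAP.get? x = some v := by
  rw [String.toList_inj.mp hx]; exact hkv

theorem get?_slice_none (g : String) (n : Nat)
    (h : ∀ k ∈ GRID_PREFIX_MAP.keys, k.toList.length ≤ n → ¬ (k.toList <+: g.toList)) :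
    GRID_PREFIX_MAP.get? (PySem.Str.slice g none (some (n : Int))) = none := by
  rw [PySem.Dict.get?_eq_none_iff_not_mem_keys]
  intro hm
  have hx : (PySem.Str.slice g none (some (n : Int))).toList = g.toList.take n := slice_toList g n
  refine h _ hm ?_ ?_
  · rw [hx]; simp [List.length_take]
  · rw [hx]; exact List.take_prefix n g.toList

theorem scan_eq_lookup (g : String) :
    inferScanA g GRID_PREFIX_MAP.items = inferLookupB g pvLengths := by
  rw [lengths_eq]
  by_cases h1 : ['L','2','N','S'] <+: g.toList
  case pos =>
    have e : GRID_PREFIX_MAP.get? (PySem.Str.slice g none (some (4 : Int))) = some "南山区" :=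
      get?_some_of_toList _ "L2NS" _ ((slice_toList g 4).trans (List.prefix_iff_eq_take.mp h1).symm) (by decide)
    have hB : inferLookupB g [4, 5, 6] = some "南山区" := by simp [inferLookupB, e]
    have hA : inferScanA g GRID_PREFIX_MAP.items = some "南山区" := by
      simp [GRID_PREFIX_MAP, inferScanA, PySem.Chars.startswith_iff, h1]
    rw [hA, hB]
  by_cases h2 : ['L','2','F','T'] <+: g.toList
  case pos =>
    have e : GRID_PREFIX_MAP.get? (PySem.Str.slice g none (some (4 : Int))) = some "福田区" :=
      get?_some_of_toList _ "L2FT" _ ((slice_toList g 4).trans (List.prefix_iff_eq_take.mp h2).symm) (by decide)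
    have hB : inferLookupB g [4, 5, 6] = some "福田区" := by simp [inferLookupB, e]
    have hA : inferScanA g GRID_PREFIX_MAP.items = some "福田区" := by
      simp [GRID_PREFIX_MAP, inferScanA, PySem.Chars.startswith_iff, h1, h2]
    rw [hA, hB]
  by_cases h3 : ['L','2','L','H'] <+: g.toList
  case pos =>
    have e : GRID_PREFIX_MAP.get? (PySem.Str.slice g none (some (4 : Int))) = some "龙华区" :=
      get?_some_of_toList _ "L2LH" _ ((slice_toList g 4).trans (List.prefix_iff_eq_take.mp h3).symm) (by decide)
    have hB : inferLookupB g [4, 5, 6] = some "龙华区" := by simp [inferLookupB, e]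
    have hA : inferScanA g GRID_PREFIX_MAP.items = some "龙华区" := by
      simp [GRID_PREFIX_MAP, inferScanA, PySem.Chars.startswith_iff, h1, h2, h3]
    rw [hA, hB]
  by_cases h4 : ['L','2','L','G'] <+: g.toList
  case pos =>
    have e : GRID_PREFIX_MAP.get? (PySem.Str.slice g none (some (4 : Int))) = some "龙岗区" :=
      get?_some_of_toList _ "L2LG" _ ((slice_toList g 4).trans (List.prefix_iff_eq_take.mp h4).symm) (by decide)
    have hB : inferLookupB g [4, 5, 6] = some "龙岗区" := by simp [inferLookupB, e]
    have hA : inferScanA g GRID_PREFIX_MAP.items = some "龙岗区" := by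
      simp [GRID_PREFIX_MAP, inferScanA, PySem.Chars.startswith_iff, h1, h2, h3, h4]
    rw [hA, hB]
  by_cases h5 : ['L','2','B','A','B','C'] <+: g.toList
  case pos =>
    have t6 : g.toList.take 6 = ['L','2','B','A','B','C'] := (List.prefix_iff_eq_take.mp h5).symm
    have t4 : g.toList.take 4 = ['L','2','B','A'] := by
      have hc := congrArg (List.take 4) t6
      rw [List.take_take, show min 4 6 = 4 by decide] at hc
      simpa using hc
    have n4 : GRID_PREFIX_MAP.get? (PySem.Str.slice g none (some (4 : Int))) = none :=
      get?_none_of_toList _ _ ((slice_toList g 4).trans t4) (by decide)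
    have t5 : g.toList.take 5 = ['L','2','B','A','B'] := by
      have hc := congrArg (List.take 5) t6
      rw [List.take_take, show min 5 6 = 5 by decide] at hc
      simpa using hc
    have n5 : GRID_PREFIX_MAP.get? (PySem.Str.slice g none (some (5 : Int))) = none :=
      get?_none_of_toList _ _ ((slice_toList g 5).trans t5) (by decide)
    have e : GRID_PREFIX_MAP.get? (PySem.Str.slice g none (some (6 : Int))) = some "宝安区" :=
      get?_some_of_toList _ "L2BABC" _ ((slice_toList g 6).trans t6) (by decide)
    have hB : inferLookupB g [4, 5, 6] = some "宝安区" := by simp [inferLookupB, e, n4, n5]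
    have hA : inferScanA g GRID_PREFIX_MAP.items = some "宝安区" := by
      simp [GRID_PREFIX_MAP, inferScanA, PySem.Chars.startswith_iff, h1, h2, h3, h4, h5]
    rw [hA, hB]
  by_cases h6 : ['L','2','B','A','S','J'] <+: g.toList
  case pos =>
    have t6 : g.toList.take 6 = ['L','2','B','A','S','J'] := (List.prefix_iff_eq_take.mp h6).symm
    have t4 : g.toList.take 4 = ['L','2','B','A'] := by
      have hc := congrArg (List.take 4) t6
      rw [List.take_take, show min 4 6 = 4 by decide] at hc
      simpa using hc
    have n4 : GRID_PREFIX_MAP.get? (PySem.Str.slice g none (some (4 : Int))) = none :=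
      get?_none_of_toList _ _ ((slice_toList g 4).trans t4) (by decide)
    have t5 : g.toList.take 5 = ['L','2','B','A','S'] := by
      have hc := congrArg (List.take 5) t6
      rw [List.take_take, show min 5 6 = 5 by decide] at hc
      simpa using hc
    have n5 : GRID_PREFIX_MAP.get? (PySem.Str.slice g none (some (5 : Int))) = none :=
      get?_none_of_toList _ _ ((slice_toList g 5).trans t5) (by decide)
    have e : GRID_PREFIX_MAP.get? (PySem.Str.slice g none (some (6 : Int))) = some "宝安区" :=
      get?_some_of_toList _ "L2BASJ" _ ((slice_toList g 6).trans t6) (by decide)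
    have hB : inferLookupB g [4, 5, 6] = some "宝安区" := by simp [inferLookupB, e, n4, n5]
    have hA : inferScanA g GRID_PREFIX_MAP.items = some "宝安区" := by
      simp [GRID_PREFIX_MAP, inferScanA, PySem.Chars.startswith_iff, h1, h2, h3, h4, h5, h6]
    rw [hA, hB]
  by_cases h7 : ['L','2','B','A','S','G'] <+: g.toList
  case pos =>
    have t6 : g.toList.take 6 = ['L','2','B','A','S','G'] := (List.prefix_iff_eq_take.mp h7).symm
    have t4 : g.toList.take 4 = ['L','2','B','A'] := by
      have hc := congrArg (List.take 4) t6
      rw [List.take_take, show min 4 6 = 4 by decide] at hc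
      simpa using hc
    have n4 : GRID_PREFIX_MAP.get? (PySem.Str.slice g none (some (4 : Int))) = none :=
      get?_none_of_toList _ _ ((slice_toList g 4).trans t4) (by decide)
    have t5 : g.toList.take 5 = ['L','2','B','A','S'] := by
      have hc := congrArg (List.take 5) t6
      rw [List.take_take, show min 5 6 = 5 by decide] at hc
      simpa using hc
    have n5 : GRID_PREFIX_MAP.get? (PySem.Str.slice g none (some (5 : Int))) = none :=
      get?_none_of_toList _ _ ((slice_toList g 5).trans t5) (by decide)
    have e : GRID_PREFIX_MAP.get? (PySem.Str.slice g none (some (6 : Int))) = some "宝安区" :=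
      get?_some_of_toList _ "L2BASG" _ ((slice_toList g 6).trans t6) (by decide)
    have hB : inferLookupB g [4, 5, 6] = some "宝安区" := by simp [inferLookupB, e, n4, n5]
    have hA : inferScanA g GRID_PREFIX_MAP.items = some "宝安区" := by
      simp [GRID_PREFIX_MAP, inferScanA, PySem.Chars.startswith_iff, h1, h2, h3, h4, h5, h6, h7]
    rw [hA, hB]
  by_cases h8 : ['L','2','G','M'] <+: g.toList
  case pos =>
    have e : GRID_PREFIX_MAP.get? (PySem.Str.slice g none (some (4 : Int))) = some "光明区" :=
      get?_some_of_toList _ "L2GM" _ ((slice_toList g 4).trans (List.prefix_iff_eq_take.mp h8).symm) (by decide)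
    have hB : inferLookupB g [4, 5, 6] = some "光明区" := by simp [inferLookupB, e]
    have hA : inferScanA g GRID_PREFIX_MAP.items = some "光明区" := by
      simp [GRID_PREFIX_MAP, inferScanA, PySem.Chars.startswith_iff, h1, h2, h3, h4, h5, h6, h7, h8]
    rw [hA, hB]
  by_cases h9 : ['L','2','P','S'] <+: g.toList
  case pos =>
    have e : GRID_PREFIX_MAP.get? (PySem.Str.slice g none (some (4 : Int))) = some "坪山区" :=
      get?_some_of_toList _ "L2PS" _ ((slice_toList g 4).trans (List.prefix_iff_eq_take.mp h9).symm) (by decide)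
    have hB : inferLookupB g [4, 5, 6] = some "坪山区" := by simp [inferLookupB, e]
    have hA : inferScanA g GRID_PREFIX_MAP.items = some "坪山区" := by
      simp [GRID_PREFIX_MAP, inferScanA, PySem.Chars.startswith_iff, h1, h2, h3, h4, h5, h6, h7, h8, h9]
    rw [hA, hB]
  by_cases h10 : ['L','2','L','Y','T'] <+: g.toList
  case pos =>
    have t5 : g.toList.take 5 = ['L','2','L','Y','T'] := (List.prefix_iff_eq_take.mp h10).symm
    have t4 : g.toList.take 4 = ['L','2','L','Y'] := by
      have hc := congrArg (List.take 4) t5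
      rw [List.take_take, show min 4 5 = 4 by decide] at hc
      simpa using hc
    have n4 : GRID_PREFIX_MAP.get? (PySem.Str.slice g none (some (4 : Int))) = none :=
      get?_none_of_toList _ _ ((slice_toList g 4).trans t4) (by decide)
    have e : GRID_PREFIX_MAP.get? (PySem.Str.slice g none (some (5 : Int))) = some "盐田区" :=
      get?_some_of_toList _ "L2LYT" _ ((slice_toList g 5).trans t5) (by decide)
    have hB : inferLookupB g [4, 5, 6] = some "盐田区" := by simp [inferLookupB, e, n4]
    have hA : inferScanA g GRID_PREFIX_MAP.items = some "盐田区" := by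
      simp [GRID_PREFIX_MAP, inferScanA, PySem.Chars.startswith_iff, h1, h2, h3, h4, h5, h6, h7, h8, h9, h10]
    rw [hA, hB]
  by_cases h11 : ['L','2','L','D','P'] <+: g.toList
  case pos =>
    have t5 : g.toList.take 5 = ['L','2','L','D','P'] := (List.prefix_iff_eq_take.mp h11).symm
    have t4 : g.toList.take 4 = ['L','2','L','D'] := by
      have hc := congrArg (List.take 4) t5
      rw [List.take_take, show min 4 5 = 4 by decide] at hc
      simpa using hc
    have n4 : GRID_PREFIX_MAP.get? (PySem.Str.slice g none (some (4 : Int))) = none :=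
      get?_none_of_toList _ _ ((slice_toList g 4).trans t4) (by decide)
    have e : GRID_PREFIX_MAP.get? (PySem.Str.slice g none (some (5 : Int))) = some "大鹏新区" :=
      get?_some_of_toList _ "L2LDP" _ ((slice_toList g 5).trans t5) (by decide)
    have hB : inferLookupB g [4, 5, 6] = some "大鹏新区" := by simp [inferLookupB, e, n4]
    have hA : inferScanA g GRID_PREFIX_MAP.items = some "大鹏新区" := by
      simp [GRID_PREFIX_MAP, inferScanA, PySem.Chars.startswith_iff, h1, h2, h3, h4, h5, h6, h7, h8, h9, h10, h11]
    rw [hA, hB]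
  by_cases h12 : ['L','2','L','S','S'] <+: g.toList
  case pos =>
    have t5 : g.toList.take 5 = ['L','2','L','S','S'] := (List.prefix_iff_eq_take.mp h12).symm
    have t4 : g.toList.take 4 = ['L','2','L','S'] := by
      have hc := congrArg (List.take 4) t5
      rw [List.take_take, show min 4 5 = 4 by decide] at hc
      simpa using hc
    have n4 : GRID_PREFIX_MAP.get? (PySem.Str.slice g none (some (4 : Int))) = none :=
      get?_none_of_toList _ _ ((slice_toList g 4).trans t4) (by decide)
    have e : GRID_PREFIX_MAP.get? (PySem.Str.slice g none (some (5 : Int))) = some "罗湖区" :=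
      get?_some_of_toList _ "L2LSS" _ ((slice_toList g 5).trans t5) (by decide)
    have hB : inferLookupB g [4, 5, 6] = some "罗湖区" := by simp [inferLookupB, e, n4]
    have hA : inferScanA g GRID_PREFIX_MAP.items = some "罗湖区" := by
      simp [GRID_PREFIX_MAP, inferScanA, PySem.Chars.startswith_iff, h1, h2, h3, h4, h5, h6, h7, h8, h9, h10, h11, h12]
    rw [hA, hB]
  have hall : ∀ n : Nat, ∀ k ∈ GRID_PREFIX_MAP.keys, k.toList.length ≤ n → ¬ (k.toList <+: g.toList) := by
    intro n k hk _
    simp [GRID_PREFIX_MAP] at hk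
    rcases hk with rfl|rfl|rfl|rfl|rfl|rfl|rfl|rfl|rfl|rfl|rfl|rfl <;> simp_all
  have n4 : GRID_PREFIX_MAP.get? (PySem.Str.slice g none (some (4 : Int))) = none := get?_slice_none g 4 (hall 4)
  have n5 : GRID_PREFIX_MAP.get? (PySem.Str.slice g none (some (5 : Int))) = none := get?_slice_none g 5 (hall 5)
  have n6 : GRID_PREFIX_MAP.get? (PySem.Str.slice g none (some (6 : Int))) = none := get?_slice_none g 6 (hall 6)
  have hB : inferLookupB g [4, 5, 6] = none := by simp [inferLookupB, n4, n5, n6]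
  have hA : inferScanA g GRID_PREFIX_MAP.items = none := by
    simp [GRID_PREFIX_MAP, inferScanA, PySem.Chars.startswith_iff, h1, h2, h3, h4, h5, h6, h7, h8, h9, h10, h11, h12]
  rw [hA, hB]

-- ===== VERDICT (by name: the statement is the Claim_ definition above) =====
theorem infer_region_from_grid_spec : Claim_equal_infer_region_from_grid := by
  intro grid_code _
  simp only [Spec_infer_region_from_grid, infer_region_from_grid, infer_region_from_grid_alt]
  exact scan_eq_lookup (PySem.Str.strip grid_code)
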